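-- pv_equiv track=rewrite | github.com/joselo-ai/roostr-research | trading/scrapers/data_quality_checker.py | _are_equivalent_tickers
-- ===== SOURCE A (Python) =====
-- from typing import Tuple, List, Dict, Any
--
-- def _are_equivalent_tickers(ticker: str, existing_tickers: List[str]) -> bool:
--     """Check if ticker is wrapped/equivalent version of existing"""
--     equivalents = {
--         'BTC': ['WBTC', 'BTCB', 'RENBTC'],
--         'ETH': ['WETH', 'BETH'],
--         'USD': ['USDT', 'USDC', 'BUSD', 'DAI', 'TUSD']
--     }
--
--     for base, variants in equivalents.items():
--         if ticker == base:
--             # Check if any variant exists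
--             if any(v in existing_tickers for v in variants):
--                 return True
--         elif ticker in variants:
--             # Check if base exists
--             if base in existing_tickers or any(v in existing_tickers for v in variants if v != ticker):
--                 return True
--
--     return False
-- ===== SOURCE B (Python) =====
-- from typing import List
--
-- _EQUIVALENTS = {
--     'BTC': ['WBTC', 'BTCB', 'RENBTC'],
--     'ETH': ['WETH', 'BETH'],
--     'USD': ['USDT', 'USDC', 'BUSD', 'DAI', 'TUSD']
-- }
--
-- # Inverted index: every symbol (base or variant) -> the full equivalence group it belongs to.
-- _INDEX = {}
-- for _base, _variants in _EQUIVALENTS.items():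
--     _group = [_base] + _variants
--     for _sym in _group:
--         _INDEX[_sym] = _group
--
--
-- def _are_equivalent_tickers(ticker: str, existing_tickers: List[str]) -> bool:
--     """Check if ticker is wrapped/equivalent version of existing"""
--     group = _INDEX.get(ticker)
--     if group is None:
--         return False
--     return any(m != ticker and m in existing_tickers for m in group)
-- ===== Notes on version B (the rewrite author's own statement) =====
-- stated objective: simpler
-- what changed: Replaced the loop over all equivalence groups with base/variant branching by a precomputed inverted index mapping every symbol to its full group, so the check becomes a single lookup plus one membership scan over that group excluding the ticker itself.
import Mathlib
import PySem

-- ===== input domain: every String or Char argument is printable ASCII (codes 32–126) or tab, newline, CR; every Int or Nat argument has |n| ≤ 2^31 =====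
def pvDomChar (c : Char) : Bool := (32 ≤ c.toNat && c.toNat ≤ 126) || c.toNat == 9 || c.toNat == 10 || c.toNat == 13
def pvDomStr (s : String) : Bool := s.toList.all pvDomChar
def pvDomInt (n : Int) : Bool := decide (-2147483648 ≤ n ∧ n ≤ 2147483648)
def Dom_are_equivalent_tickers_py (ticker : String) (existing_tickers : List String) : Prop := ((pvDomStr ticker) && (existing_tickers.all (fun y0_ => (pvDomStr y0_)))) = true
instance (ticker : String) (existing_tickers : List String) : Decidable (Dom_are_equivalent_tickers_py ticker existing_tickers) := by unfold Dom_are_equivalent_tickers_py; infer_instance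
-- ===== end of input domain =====

-- B replaces A's loop over all groups with base/variant branches by a precomputed inverted index
-- (symbol -> its full equivalence group) and one membership scan of that group: simpler, one uniform case.


-- ===== PORT A =====
-- the literal dict of equivalence groups, in insertion order
def pvEquivalents : List (String × List String) :=
  [("BTC", ["WBTC", "BTCB", "RENBTC"]),
   ("ETH", ["WETH", "BETH"]),
   ("USD", ["USDT", "USDC", "BUSD", "DAI", "TUSD"])]

-- the 'for base, variants in equivalents.items():' loop with its early returns
def pvALoop (ticker : String) (existing_tickers : List String) :
    List (String × List String) → Bool
  | [] => false
  | (base, variants) :: rest =>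
    if ticker == base then
      if variants.any (fun v => existing_tickers.contains v) then true
      else pvALoop ticker existing_tickers rest
    else if variants.contains ticker then
      if existing_tickers.contains base
          || variants.any (fun v => v != ticker && existing_tickers.contains v) then true
      else pvALoop ticker existing_tickers rest
    else pvALoop ticker existing_tickers rest

def are_equivalent_tickers_py (ticker : String) (existing_tickers : List String) : Bool :=
  pvALoop ticker existing_tickers pvEquivalents

-- ===== PORT B =====
-- inverted index built once from the groups: every symbol maps to its full group ([base] ++ variants)
def pvTickerIndex : PySem.Dict String (List String) :=
  pvEquivalents.foldl
    (fun d p => (p.1 :: p.2).foldl (fun d' s => d'.insert s (p.1 :: p.2)) d)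
    PySem.Dict.empty

def are_equivalent_tickers_py_alt (ticker : String) (existing_tickers : List String) : Bool :=
  match pvTickerIndex.get? ticker with
  | none => false
  | some group => group.any (fun m => m != ticker && existing_tickers.contains m)

-- ===== PRECONDITION & SPEC =====
def Spec_are_equivalent_tickers_py (ticker : String) (existing_tickers : List String) (out : Bool) : Prop := out = are_equivalent_tickers_py_alt ticker existing_tickers
instance (ticker : String) (existing_tickers : List String) (out : Bool) : Decidable (Spec_are_equivalent_tickers_py ticker existing_tickers out) := by unfold Spec_are_equivalent_tickers_py; infer_instance

-- ===== CLAIM (what is proved, stated in full; the proofs are below) =====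
def Claim_equal_are_equivalent_tickers_py : Prop := ∀ (ticker : String) (existing_tickers : List String), Dom_are_equivalent_tickers_py ticker existing_tickers → Spec_are_equivalent_tickers_py ticker existing_tickers (are_equivalent_tickers_py ticker existing_tickers)

-- ===== LEMMAS AND PROOFS =====
-- the fold that builds the index evaluates to this literal association list
theorem pvTickerIndex_eq :
    pvTickerIndex = PySem.Dict.mk
      [("BTC", ["BTC", "WBTC", "BTCB", "RENBTC"]),
       ("WBTC", ["BTC", "WBTC", "BTCB", "RENBTC"]),
       ("BTCB", ["BTC", "WBTC", "BTCB", "RENBTC"]),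
       ("RENBTC", ["BTC", "WBTC", "BTCB", "RENBTC"]),
       ("ETH", ["ETH", "WETH", "BETH"]),
       ("WETH", ["ETH", "WETH", "BETH"]),
       ("BETH", ["ETH", "WETH", "BETH"]),
       ("USD", ["USD", "USDT", "USDC", "BUSD", "DAI", "TUSD"]),
       ("USDT", ["USD", "USDT", "USDC", "BUSD", "DAI", "TUSD"]),
       ("USDC", ["USD", "USDT", "USDC", "BUSD", "DAI", "TUSD"]),
       ("BUSD", ["USD", "USDT", "USDC", "BUSD", "DAI", "TUSD"]),
       ("DAI", ["USD", "USDT", "USDC", "BUSD", "DAI", "TUSD"]),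
       ("TUSD", ["USD", "USDT", "USDC", "BUSD", "DAI", "TUSD"])] := by decide

-- ===== VERDICT (by name: the statement is the Claim_ definition above) =====
theorem are_equivalent_tickers_py_spec : Claim_equal_are_equivalent_tickers_py := by
  intro t ex _
  show are_equivalent_tickers_py t ex = are_equivalent_tickers_py_alt t ex
  by_cases h1 : t = "BTC"
  · subst h1; simp [are_equivalent_tickers_py, are_equivalent_tickers_py_alt, pvALoop,
      pvEquivalents, pvTickerIndex_eq, PySem.Dict.get?_mk_cons]
  by_cases h2 : t = "WBTC"
  · subst h2; simp [are_equivalent_tickers_py, are_equivalent_tickers_py_alt, pvALoop,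
      pvEquivalents, pvTickerIndex_eq, PySem.Dict.get?_mk_cons]
  by_cases h3 : t = "BTCB"
  · subst h3; simp [are_equivalent_tickers_py, are_equivalent_tickers_py_alt, pvALoop,
      pvEquivalents, pvTickerIndex_eq, PySem.Dict.get?_mk_cons]
  by_cases h4 : t = "RENBTC"
  · subst h4; simp [are_equivalent_tickers_py, are_equivalent_tickers_py_alt, pvALoop,
      pvEquivalents, pvTickerIndex_eq, PySem.Dict.get?_mk_cons]
  by_cases h5 : t = "ETH"
  · subst h5; simp [are_equivalent_tickers_py, are_equivalent_tickers_py_alt, pvALoop,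
      pvEquivalents, pvTickerIndex_eq, PySem.Dict.get?_mk_cons]
  by_cases h6 : t = "WETH"
  · subst h6; simp [are_equivalent_tickers_py, are_equivalent_tickers_py_alt, pvALoop,
      pvEquivalents, pvTickerIndex_eq, PySem.Dict.get?_mk_cons]
  by_cases h7 : t = "BETH"
  · subst h7; simp [are_equivalent_tickers_py, are_equivalent_tickers_py_alt, pvALoop,
      pvEquivalents, pvTickerIndex_eq, PySem.Dict.get?_mk_cons]
  by_cases h8 : t = "USD"
  · subst h8; simp [are_equivalent_tickers_py, are_equivalent_tickers_py_alt, pvALoop,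
      pvEquivalents, pvTickerIndex_eq, PySem.Dict.get?_mk_cons]
  by_cases h9 : t = "USDT"
  · subst h9; simp [are_equivalent_tickers_py, are_equivalent_tickers_py_alt, pvALoop,
      pvEquivalents, pvTickerIndex_eq, PySem.Dict.get?_mk_cons]
  by_cases h10 : t = "USDC"
  · subst h10; simp [are_equivalent_tickers_py, are_equivalent_tickers_py_alt, pvALoop,
      pvEquivalents, pvTickerIndex_eq, PySem.Dict.get?_mk_cons]
  by_cases h11 : t = "BUSD"
  · subst h11; simp [are_equivalent_tickers_py, are_equivalent_tickers_py_alt, pvALoop,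
      pvEquivalents, pvTickerIndex_eq, PySem.Dict.get?_mk_cons]
  by_cases h12 : t = "DAI"
  · subst h12; simp [are_equivalent_tickers_py, are_equivalent_tickers_py_alt, pvALoop,
      pvEquivalents, pvTickerIndex_eq, PySem.Dict.get?_mk_cons]
  by_cases h13 : t = "TUSD"
  · subst h13; simp [are_equivalent_tickers_py, are_equivalent_tickers_py_alt, pvALoop,
      pvEquivalents, pvTickerIndex_eq, PySem.Dict.get?_mk_cons]
  · simp [are_equivalent_tickers_py, are_equivalent_tickers_py_alt, pvALoop,
      pvEquivalents, pvTickerIndex_eq, PySem.Dict.get?,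
      h1, h2, h3, h4, h5, h6, h7, h8, h9, h10, h11, h12, h13,
      Ne.symm h1, Ne.symm h2, Ne.symm h3, Ne.symm h4, Ne.symm h5, Ne.symm h6, Ne.symm h7,
      Ne.symm h8, Ne.symm h9, Ne.symm h10, Ne.symm h11, Ne.symm h12, Ne.symm h13]
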